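-- pv_equiv track=rewrite | github.com/ali90h/AutoRepro | autorepro/render/formats.py | _extract_tokens_from_text
-- ===== SOURCE A (Python) =====
-- def _extract_tokens_from_text(text: str) -> list[str]:
--     """Extract clean tokens from text, splitting on commas and spaces."""
--     tokens: list[str] = []
--     if not text:
--         return tokens
--
--     # Split by commas first
--     parts = text.split(",")
--     for part in parts:
--         part = part.strip()
--         if part:
--             # Split by spaces for multi-word tokens
--             words = part.split()
--             for word in words:
--                 clean_token = "".join(c for c in word if c.isalnum() or c in "-_")
--                 if clean_token and not clean_token.isdigit():
--                     tokens.append(clean_token)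
--
--     return tokens
-- ===== SOURCE B (Python) =====
-- def _extract_tokens_from_text(text: str) -> list[str]:
--     """Extract clean tokens from text, splitting on commas and spaces."""
--     tokens: list[str] = []
--     word = ""
--     for c in text:
--         if c == "," or c.isspace():
--             if word and not word.isdigit():
--                 tokens.append(word)
--             word = ""
--         elif c.isalnum() or c in "-_":
--             word += c
--     if word and not word.isdigit():
--         tokens.append(word)
--     return tokens
-- ===== Notes on version B (the rewrite author's own statement) =====
-- stated objective: alternative
-- what changed: Replaces the nested split-on-comma / strip / split-on-whitespace / per-word filter-and-join passes with a single left-to-right character scanner that keeps one current-word buffer and flushes it at commas and whitespace.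
import Mathlib
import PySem

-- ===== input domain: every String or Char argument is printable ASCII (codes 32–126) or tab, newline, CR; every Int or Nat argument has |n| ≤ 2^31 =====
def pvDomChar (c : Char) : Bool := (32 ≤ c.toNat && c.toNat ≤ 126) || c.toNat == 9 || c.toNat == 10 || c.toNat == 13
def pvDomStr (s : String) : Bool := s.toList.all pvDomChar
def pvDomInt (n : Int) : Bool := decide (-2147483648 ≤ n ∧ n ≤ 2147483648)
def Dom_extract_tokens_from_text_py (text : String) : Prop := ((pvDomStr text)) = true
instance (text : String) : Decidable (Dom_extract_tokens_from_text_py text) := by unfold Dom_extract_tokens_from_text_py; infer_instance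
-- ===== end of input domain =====

-- B replaces A's nested split-on-comma / strip / split-on-whitespace / filter-join passes by a
-- single character scanner with a current-word buffer; same return value (alternative decomposition).

-- ===== PORT A =====
def extract_tokens_from_text_py (text : String) : List String :=
  if text.toList.isEmpty then []
  else
    let parts := PySem.Chars.splitOn text.toList [',']
    parts.foldl (fun tokens part =>
      let part := PySem.Chars.strip part
      if !part.isEmpty then
        let words := PySem.Chars.split₀ part
        words.foldl (fun tokens word =>
          -- ''.join(c for c in word if c.isalnum() or c in "-_") : a join of the kept
          -- single characters, i.e. the filter of the char list (exact).
          let clean := word.filter (fun c => PySem.Chars.isalnum c || c = '-' || c = '_')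
          if !clean.isEmpty && !PySem.Chars.strIsdigit clean then tokens ++ [String.ofList clean]
          else tokens) tokens
      else tokens) []

-- ===== PORT B =====
-- flush of the buffer: append it as a token if non-empty and not all-digits
def pvFlushB (tokens : List String) (word : List Char) : List String :=
  if !word.isEmpty && !PySem.Chars.strIsdigit word then tokens ++ [String.ofList word] else tokens

def extract_tokens_from_text_py_alt (text : String) : List String :=
  let st := text.toList.foldl (fun (st : List String × List Char) c =>
    if c = ',' || PySem.Chars.isspace c then (pvFlushB st.1 st.2, [])
    else if PySem.Chars.isalnum c || c = '-' || c = '_' then (st.1, st.2 ++ [c])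
    else st) ([], [])
  pvFlushB st.1 st.2

-- ===== PRECONDITION & SPEC =====
def Spec_extract_tokens_from_text_py (text : String) (out : List String) : Prop := out = extract_tokens_from_text_py_alt text
instance (text : String) (out : List String) : Decidable (Spec_extract_tokens_from_text_py text out) := by unfold Spec_extract_tokens_from_text_py; infer_instance

-- ===== CLAIM (what is proved, stated in full; the proofs are below) =====
def Claim_equal_extract_tokens_from_text_py : Prop := ∀ (text : String), Dom_extract_tokens_from_text_py text → Spec_extract_tokens_from_text_py text (extract_tokens_from_text_py text)

-- ===== LEMMAS AND PROOFS =====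

-- separator and kept-character predicates shared by the proofs
def pvSep (c : Char) : Bool := c = ',' || PySem.Chars.isspace c
def pvKeep (c : Char) : Bool := PySem.Chars.isalnum c || c = '-' || c = '_'
-- the token (0 or 1 of them) a raw word contributes
def pvGw (w : List Char) : List String :=
  let t := w.filter pvKeep
  if !t.isEmpty && !PySem.Chars.strIsdigit t then [String.ofList t] else []
-- reference scanner over a RAW (unfiltered) current-word buffer
def pvTok : List Char → List Char → List String
  | [], buf => pvGw buf
  | c :: cs, buf => if pvSep c then pvGw buf ++ pvTok cs [] else pvTok cs (buf ++ [c])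
-- B-shaped scanner over the FILTERED buffer
def pvTf : List Char → List Char → List String
  | [], buf => pvFlushB [] buf
  | c :: cs, buf =>
      if pvSep c then pvFlushB [] buf ++ pvTf cs []
      else if pvKeep c then pvTf cs (buf ++ [c]) else pvTf cs buf
-- splitOn _ [','] as a plain recursion
def pvCommaSplit : List Char → List Char → List (List Char)
  | pre, [] => [pre]
  | pre, c :: cs => if c = ',' then pre :: pvCommaSplit [] cs else pvCommaSplit (pre ++ [c]) cs
-- split₀ as a plain recursion
def pvWords : List Char → List Char → List (List Char)
  | cur, [] => if cur.isEmpty then [] else [cur]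
  | cur, c :: cs =>
      if PySem.Chars.isspace c then
        if cur.isEmpty then pvWords [] cs else cur :: pvWords [] cs
      else pvWords (cur ++ [c]) cs
-- A's comma loop fused with the per-part tokenisation
def pvF : List Char → List Char → List String
  | cur, [] => (PySem.Chars.split₀ cur).flatMap pvGw
  | cur, c :: cs =>
      if c = ',' then (PySem.Chars.split₀ cur).flatMap pvGw ++ pvF [] cs
      else pvF (cur ++ [c]) cs

theorem pvSplitOn_go_comma (fuel : Nat) : ∀ (l cur : List Char) (hacc : List (List Char)),
    l.length < fuel →
    PySem.Chars.splitOn.go [','] fuel l cur hacc = hacc.reverse ++ pvCommaSplit cur.reverse l := by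
  induction fuel with
  | zero => intro l cur acc h; omega
  | succ f ih =>
    intro l cur acc h
    match l with
    | [] => simp [PySem.Chars.splitOn.go, pvCommaSplit]
    | c :: rest =>
      rw [PySem.Chars.splitOn.go]
      by_cases hc : c = ','
      · subst hc
        simp only [List.isPrefixOf, BEq.rfl, Bool.and_eq_true]
        simp [ih _ _ _ (by simp at h ⊢; omega), pvCommaSplit]
      · have hp : ([','].isPrefixOf (c :: rest)) = false := by
          simp [List.isPrefixOf]; exact fun h' => (hc h'.symm).elim
        simp only [hp, Bool.false_eq_true, if_false]
        rw [ih _ _ _ (by simp at h ⊢; omega)]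
        simp [pvCommaSplit, hc]


theorem pvSplitOn_comma (cs : List Char) :
    PySem.Chars.splitOn cs [','] = pvCommaSplit [] cs := by
  rw [PySem.Chars.splitOn, pvSplitOn_go_comma _ _ _ _ (by omega)]; rfl

theorem pvSplit₀_go (l : List Char) : ∀ (cur : List Char) (acc : List (List Char)),
    PySem.Chars.split₀.go l cur acc = acc.reverse ++ pvWords cur.reverse l := by
  induction l with
  | nil =>
    intro cur acc
    rw [PySem.Chars.split₀.go]
    by_cases h : cur.isEmpty <;> simp [h, pvWords]
  | cons c rest ih =>
    intro cur acc
    rw [PySem.Chars.split₀.go]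
    by_cases hs : PySem.Chars.isspace c
    · by_cases he : cur.isEmpty
      · simp [hs, ih, pvWords, List.isEmpty_iff.mp he]
      · simp [hs, he, ih, pvWords]
    · simp [hs, ih, pvWords]

theorem pvSplit₀_eq (l : List Char) : PySem.Chars.split₀ l = pvWords [] l := by
  rw [PySem.Chars.split₀, pvSplit₀_go]; rfl

theorem pvWords_dropWhile (l : List Char) :
    pvWords [] (l.dropWhile PySem.Chars.isspace) = pvWords [] l := by
  induction l with
  | nil => rfl
  | cons c rest ih =>
    by_cases hs : PySem.Chars.isspace c
    · simp [hs, ih, pvWords]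
    · simp [hs, pvWords]

theorem pvWords_all_space (t : List Char) (ht : ∀ c ∈ t, PySem.Chars.isspace c) :
    ∀ cur, pvWords cur t = if cur.isEmpty then [] else [cur] := by
  induction t with
  | nil => intro cur; rfl
  | cons c t' iht =>
    intro cur
    have hc := ht c (by simp)
    have ht' : ∀ x ∈ t', PySem.Chars.isspace x := fun x h => ht x (by simp [h])
    by_cases he : cur.isEmpty <;>
      simp [pvWords, hc, he, iht ht' []]

theorem pvWords_append_space (t : List Char) (ht : ∀ c ∈ t, PySem.Chars.isspace c) :
    ∀ (l cur : List Char), pvWords cur (l ++ t) = pvWords cur l := by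
  intro l
  induction l with
  | nil => intro cur; simpa [pvWords] using pvWords_all_space t ht cur
  | cons c rest ih =>
    intro cur
    simp only [List.cons_append, pvWords]
    by_cases hs : PySem.Chars.isspace c <;> simp [hs, ih]

theorem pvSplit₀_strip (s : List Char) :
    PySem.Chars.split₀ (PySem.Chars.strip s) = PySem.Chars.split₀ s := by
  have h1 : PySem.Chars.split₀ (PySem.Chars.lstrip s) = PySem.Chars.split₀ s := by
    rw [pvSplit₀_eq, pvSplit₀_eq, PySem.Chars.lstrip, pvWords_dropWhile]
  rw [← h1, PySem.Chars.strip]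
  set u := PySem.Chars.lstrip s with hu
  have hdecomp : u = PySem.Chars.rstrip u ++ (u.reverse.takeWhile PySem.Chars.isspace).reverse := by
    conv_lhs => rw [← u.reverse_reverse,
      ← List.takeWhile_append_dropWhile (p := PySem.Chars.isspace) (l := u.reverse),
      List.reverse_append]
    rw [PySem.Chars.rstrip]
  have hsp : ∀ c ∈ (u.reverse.takeWhile PySem.Chars.isspace).reverse, PySem.Chars.isspace c := by
    intro c hcm
    exact List.mem_takeWhile_imp (List.mem_reverse.mp hcm)
  calc PySem.Chars.split₀ (PySem.Chars.rstrip u)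
      = pvWords [] (PySem.Chars.rstrip u) := pvSplit₀_eq _
    _ = pvWords [] (PySem.Chars.rstrip u ++ (u.reverse.takeWhile PySem.Chars.isspace).reverse) :=
        (pvWords_append_space _ hsp _ _).symm
    _ = pvWords [] u := by rw [← hdecomp]
    _ = PySem.Chars.split₀ u := (pvSplit₀_eq _).symm

theorem pvFlushB_eq (res : List String) (buf : List Char) :
    pvFlushB res buf = res ++ pvFlushB [] buf := by
  unfold pvFlushB; split <;> simp

theorem pvGw_eq (buf : List Char) : pvGw buf = pvFlushB [] (buf.filter pvKeep) := by
  unfold pvGw pvFlushB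
  by_cases h : (!(List.filter pvKeep buf).isEmpty && !PySem.Chars.strIsdigit (List.filter pvKeep buf)) = true <;>
    simp [h]

theorem pvInner_foldl (ws : List (List Char)) : ∀ (acc : List String),
    ws.foldl (fun tokens word =>
      let clean := word.filter (fun c => PySem.Chars.isalnum c || c = '-' || c = '_')
      if !clean.isEmpty && !PySem.Chars.strIsdigit clean then tokens ++ [String.ofList clean]
      else tokens) acc = acc ++ ws.flatMap pvGw := by
  induction ws with
  | nil => intro acc; simp
  | cons w ws ih =>
    intro acc
    simp only [List.foldl_cons, List.flatMap_cons, ih]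
    have : pvKeep = fun c => PySem.Chars.isalnum c || c = '-' || c = '_' := rfl
    by_cases h : (!(w.filter pvKeep).isEmpty && !PySem.Chars.strIsdigit (w.filter pvKeep)) = true <;>
      simp [pvGw, ← this, h]

theorem pvOuter_foldl (parts : List (List Char)) : ∀ (acc : List String),
    parts.foldl (fun tokens part =>
      let part := PySem.Chars.strip part
      if !part.isEmpty then
        (PySem.Chars.split₀ part).foldl (fun tokens word =>
          let clean := word.filter (fun c => PySem.Chars.isalnum c || c = '-' || c = '_')
          if !clean.isEmpty && !PySem.Chars.strIsdigit clean then tokens ++ [String.ofList clean]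
          else tokens) tokens
      else tokens) acc
    = acc ++ parts.flatMap (fun p => (PySem.Chars.split₀ p).flatMap pvGw) := by
  induction parts with
  | nil => intro acc; simp
  | cons p ps ih =>
    intro acc
    simp only [List.foldl_cons, List.flatMap_cons, ih]
    have hstep : (if !(PySem.Chars.strip p).isEmpty then
        (PySem.Chars.split₀ (PySem.Chars.strip p)).foldl (fun tokens word =>
          let clean := word.filter (fun c => PySem.Chars.isalnum c || c = '-' || c = '_')
          if !clean.isEmpty && !PySem.Chars.strIsdigit clean then tokens ++ [String.ofList clean]
          else tokens) acc
      else acc) = acc ++ (PySem.Chars.split₀ p).flatMap pvGw := by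
      by_cases he : (PySem.Chars.strip p).isEmpty
      · have : PySem.Chars.split₀ p = [] := by
          rw [← pvSplit₀_strip, List.isEmpty_iff.mp he]; rfl
        simp [he, this]
      · simp only [he, Bool.not_false, if_pos]
        rw [pvSplit₀_strip, pvInner_foldl]
    rw [hstep, List.append_assoc]

theorem pvCommaSplit_flatMap (cs : List Char) : ∀ (cur : List Char),
    (pvCommaSplit cur cs).flatMap (fun p => (PySem.Chars.split₀ p).flatMap pvGw) = pvF cur cs := by
  induction cs with
  | nil => intro cur; simp [pvCommaSplit, pvF]
  | cons c rest ih =>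
    intro cur
    by_cases hc : c = ',' <;> simp [pvCommaSplit, pvF, hc, ih]

theorem pvWords_tok (cs : List Char) : ',' ∉ cs → ∀ (buf : List Char),
    (pvWords buf cs).flatMap pvGw = pvTok cs buf := by
  induction cs with
  | nil =>
    intro _ buf
    by_cases h : buf.isEmpty
    · simp [pvWords, pvTok, pvGw, List.isEmpty_iff.mp h]
    · simp [pvWords, pvTok, h]
  | cons c rest ih =>
    intro hc buf
    have hcr : ',' ∉ rest := fun h => hc (by simp [h])
    have hcc : ¬ c = ',' := fun h => hc (by simp [h])
    by_cases hs : PySem.Chars.isspace c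
    · have hsep : pvSep c = true := by simp [pvSep, hs]
      by_cases he : buf.isEmpty
      · simp [pvWords, pvTok, hs, hsep, ih hcr, pvGw, List.isEmpty_iff.mp he]
      · simp [pvWords, pvTok, hs, he, hsep, ih hcr]
    · have hsep : pvSep c = false := by simp [pvSep, hs, hcc]
      simp [pvWords, pvTok, hs, hsep, ih hcr]

theorem pvTok_append_sep (c : Char) (hc : pvSep c = true) (ys : List Char) :
    ∀ (xs buf : List Char), pvTok (xs ++ c :: ys) buf = pvTok xs buf ++ pvTok ys [] := by
  intro xs
  induction xs with
  | nil => intro buf; simp [pvTok, hc]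
  | cons x xs ih =>
    intro buf
    by_cases hx : pvSep x <;> simp [pvTok, hx, ih]

theorem pvF_tok (cs : List Char) : ∀ (cur : List Char), ',' ∉ cur →
    pvF cur cs = pvTok (cur ++ cs) [] := by
  induction cs with
  | nil =>
    intro cur hcur
    simp only [pvF, List.append_nil]
    rw [pvSplit₀_eq, pvWords_tok cur hcur]
  | cons c rest ih =>
    intro cur hcur
    by_cases hc : c = ','
    · subst hc
      have hsep : pvSep ',' = true := by simp [pvSep]
      have hF : pvF cur (',' :: rest) = (PySem.Chars.split₀ cur).flatMap pvGw ++ pvF [] rest := by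
        simp [pvF]
      rw [hF, pvSplit₀_eq, pvWords_tok cur hcur, ih [] (by simp), pvTok_append_sep _ hsep]
      simp
    · simp only [pvF, hc]
      rw [ih (cur ++ [c]) (by simp [hcur]; exact fun h => hc h.symm)]
      simp

theorem pvB_core (cs : List Char) : ∀ (res : List String) (buf : List Char),
    (let st := cs.foldl (fun (st : List String × List Char) c =>
        if c = ',' || PySem.Chars.isspace c then (pvFlushB st.1 st.2, [])
        else if PySem.Chars.isalnum c || c = '-' || c = '_' then (st.1, st.2 ++ [c])
        else st) (res, buf)
     pvFlushB st.1 st.2) = res ++ pvTf cs buf := by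
  induction cs with
  | nil =>
    intro res buf
    by_cases h : (!buf.isEmpty && !PySem.Chars.strIsdigit buf) = true <;>
      simp [pvFlushB, pvTf, h]
  | cons c rest ih =>
    intro res buf
    simp only [List.foldl_cons]
    by_cases hsep : (c = ',' || PySem.Chars.isspace c) = true
    · have h2 : pvSep c = true := hsep
      simp only [hsep, if_pos]
      rw [ih, pvFlushB_eq, List.append_assoc]
      have hT : pvTf (c :: rest) buf = pvFlushB [] buf ++ pvTf rest [] := by
        simp [pvTf, h2]
      rw [hT]
    · have h2 : pvSep c = false := by simpa [pvSep] using hsep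
      simp only [hsep]
      by_cases hk : (PySem.Chars.isalnum c || c = '-' || c = '_') = true
      · have h3 : pvKeep c = true := hk
        simp only [hk, if_pos]
        rw [ih]
        simp [pvTf, h2, h3]
      · have h3 : pvKeep c = false := by simpa [pvKeep] using hk
        simp only [hk]
        rw [ih]
        simp [pvTf, h2, h3]

theorem pvTf_tok (cs : List Char) : ∀ (buf : List Char),
    pvTf cs (buf.filter pvKeep) = pvTok cs buf := by
  induction cs with
  | nil => intro buf; simp [pvTf, pvTok, pvGw, pvFlushB]
  | cons c rest ih =>
    intro buf
    by_cases hs : pvSep c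
    · have h0 : pvTf rest [] = pvTok rest [] := by simpa using ih []
      simp [pvTf, pvTok, hs, pvGw_eq, h0]
    · by_cases hk : pvKeep c
      · have hfa : (buf ++ [c]).filter pvKeep = buf.filter pvKeep ++ [c] := by
          simp [hk]
        have h1 : pvTf (c :: rest) (buf.filter pvKeep) = pvTf rest (buf.filter pvKeep ++ [c]) := by
          simp [pvTf, hs, hk]
        rw [h1, ← hfa, ih]
        simp [pvTok, hs]
      · have hfa : (buf ++ [c]).filter pvKeep = buf.filter pvKeep := by
          simp [hk]
        have h1 : pvTf (c :: rest) (buf.filter pvKeep) = pvTf rest (buf.filter pvKeep) := by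
          simp [pvTf, hs, hk]
        rw [h1, ← hfa, ih]
        simp [pvTok, hs]

-- ===== VERDICT (by name: the statement is the Claim_ definition above) =====
theorem extract_tokens_from_text_py_spec : Claim_equal_extract_tokens_from_text_py := by
  intro text _
  unfold Spec_extract_tokens_from_text_py
  unfold extract_tokens_from_text_py extract_tokens_from_text_py_alt
  rw [pvB_core]
  have hB : pvTf text.toList [] = pvTok text.toList [] := by
    simpa using pvTf_tok text.toList []
  by_cases h : text.toList.isEmpty
  · rw [List.isEmpty_iff.mp h]
    simp [pvTf, pvFlushB]
  · simp only [h, Bool.false_eq_true, if_false, List.nil_append, hB]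
    rw [pvSplitOn_comma, pvOuter_foldl, pvCommaSplit_flatMap, pvF_tok _ [] (by simp)]
    simp
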